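-- pv_equiv track=rewrite | github.com/jydhasan/dictionary_matched_unmattched_values | both_matched_unmatched.py | find_matched_and_unmatched_values
-- ===== SOURCE A (Python) =====
-- def find_matched_and_unmatched_values(dict1, dict2):
--     matched_values = {}
--     unmatched_values = {}
--
--     for key, value in dict1.items():
--         if key in dict2 and dict2[key] == value:
--             matched_values[key] = value
--         else:
--             unmatched_values[key] = value
--
--     for key, value in dict2.items():
--         if key not in dict1:
--             unmatched_values[key] = value
--
--     return matched_values, unmatched_values
-- ===== SOURCE B (Python) =====
-- def find_matched_and_unmatched_values(dict1, dict2):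
--     # Sort-merge: walk the two key-sorted item lists with two pointers to
--     # classify keys (matched / dict2-only), then project the dicts in order.
--     a = sorted(dict1.items(), key=lambda kv: kv[0])
--     b = sorted(dict2.items(), key=lambda kv: kv[0])
--     matched_keys = set()
--     only2 = set()
--     i = j = 0
--     while i < len(a) and j < len(b):
--         if a[i][0] < b[j][0]:
--             i += 1
--         elif b[j][0] < a[i][0]:
--             only2.add(b[j][0])
--             j += 1
--         else:
--             if a[i][1] == b[j][1]:
--                 matched_keys.add(a[i][0])
--             i += 1
--             j += 1
--     while j < len(b):
--         only2.add(b[j][0])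
--         j += 1
--     matched = {k: v for k, v in dict1.items() if k in matched_keys}
--     unmatched = {k: v for k, v in dict1.items() if k not in matched_keys}
--     unmatched.update((k, v) for k, v in dict2.items() if k in only2)
--     return matched, unmatched
-- ===== Notes on version B (the rewrite author's own statement) =====
-- stated objective: alternative
-- what changed: Replaces A's hash-lookup classify-then-patch loops with a sort-merge: both item lists are key-sorted and a two-pointer merge computes the matched-key set and the dict2-only key set without any dict lookups; the result dicts are then projected in insertion order from those sets.
import Mathlib
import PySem

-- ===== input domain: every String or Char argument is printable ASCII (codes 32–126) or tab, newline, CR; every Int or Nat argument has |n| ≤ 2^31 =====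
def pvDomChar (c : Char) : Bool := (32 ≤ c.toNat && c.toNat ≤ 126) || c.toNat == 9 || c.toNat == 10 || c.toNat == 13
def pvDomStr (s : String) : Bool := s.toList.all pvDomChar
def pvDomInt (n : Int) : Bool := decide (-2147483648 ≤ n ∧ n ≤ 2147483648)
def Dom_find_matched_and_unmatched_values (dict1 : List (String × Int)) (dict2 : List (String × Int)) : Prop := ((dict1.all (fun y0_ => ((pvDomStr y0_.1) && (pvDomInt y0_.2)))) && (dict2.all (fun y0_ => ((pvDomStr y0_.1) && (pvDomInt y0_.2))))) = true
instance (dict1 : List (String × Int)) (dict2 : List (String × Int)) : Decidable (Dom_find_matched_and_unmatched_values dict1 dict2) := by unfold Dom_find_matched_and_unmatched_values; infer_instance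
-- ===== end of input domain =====

-- B replaces A's hash-lookup classify loops by a sort-merge: key-sorted item lists are merged
-- with two pointers to compute the matched and dict2-only key sets (objective: alternative).

-- ===== PORT A =====
def find_matched_and_unmatched_values (dict1 : List (String × Int)) (dict2 : List (String × Int)) : (List (String × Int)) × (List (String × Int)) :=
  let d2 : PySem.Dict String Int := PySem.Dict.mk dict2
  let d1 : PySem.Dict String Int := PySem.Dict.mk dict1
  -- for key, value in dict1.items(): classify into matched_values / unmatched_values
  let mu : PySem.Dict String Int × PySem.Dict String Int :=
    dict1.foldl (fun acc kv =>
      if d2.contains kv.1 && (d2.getD kv.1 0 == kv.2) then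
        (acc.1.insert kv.1 kv.2, acc.2)
      else
        (acc.1, acc.2.insert kv.1 kv.2)) (PySem.Dict.empty, PySem.Dict.empty)
  -- for key, value in dict2.items(): if key not in dict1: unmatched_values[key] = value
  let u : PySem.Dict String Int :=
    dict2.foldl (fun u kv => if !(d1.contains kv.1) then u.insert kv.1 kv.2 else u) mu.2
  (mu.1.items, u.items)

-- ===== PORT B =====
-- The two while loops of Source B: a two-pointer merge over the key-sorted item lists a and b,
-- accumulating the matched-key set and the dict2-only key set (sets are PySem.Set).
def pvMergeB : List (String × Int) → List (String × Int) → PySem.Set String → PySem.Set String → PySem.Set String × PySem.Set String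
  | [], b, mk, o2 => (mk, b.foldl (fun s kv => PySem.Set.add s kv.1) o2)
  | _ :: _, [], mk, o2 => (mk, o2)
  | (k1, v1) :: ta, (k2, v2) :: tb, mk, o2 =>
    if k1 < k2 then pvMergeB ta ((k2, v2) :: tb) mk o2
    else if k2 < k1 then pvMergeB ((k1, v1) :: ta) tb mk (PySem.Set.add o2 k2)
    else pvMergeB ta tb (if v1 == v2 then PySem.Set.add mk k1 else mk) o2
termination_by a b _ _ => a.length + b.length

def find_matched_and_unmatched_values_alt (dict1 : List (String × Int)) (dict2 : List (String × Int)) : (List (String × Int)) × (List (String × Int)) :=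
  -- a = sorted(dict1.items(), key=lambda kv: kv[0]); b = likewise for dict2
  let a : List (String × Int) := PySem.List.sorted dict1 (fun kv => kv.1)
  let b : List (String × Int) := PySem.List.sorted dict2 (fun kv => kv.1)
  let mo : PySem.Set String × PySem.Set String := pvMergeB a b PySem.Set.empty PySem.Set.empty
  -- the three dict comprehensions over unique-key item lists, ported as filters
  -- (exact under Pre_'s distinct-keys condition: no comprehension ever overwrites a key)
  let matched : List (String × Int) := dict1.filter (fun kv => PySem.Set.contains mo.1 kv.1)
  let unmatched : List (String × Int) :=
    dict1.filter (fun kv => !(PySem.Set.contains mo.1 kv.1))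
      ++ dict2.filter (fun kv => PySem.Set.contains mo.2 kv.1)
  (matched, unmatched)

-- ===== PRECONDITION & SPEC =====
-- Pre_ requires each association list to have pairwise-distinct keys: the Python arguments are
-- dicts, whose item lists always have unique keys, so no Python input is excluded.
def Pre_find_matched_and_unmatched_values (dict1 : List (String × Int)) (dict2 : List (String × Int)) : Prop :=
  (dict1.map Prod.fst).Nodup ∧ (dict2.map Prod.fst).Nodup
instance (dict1 : List (String × Int)) (dict2 : List (String × Int)) : Decidable (Pre_find_matched_and_unmatched_values dict1 dict2) := by unfold Pre_find_matched_and_unmatched_values; infer_instance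
def pvWitness_find_matched_and_unmatched_values : (List (String × Int)) × (List (String × Int)) :=
  ([("a", 1), ("b", 2), ("c", 3)], [("b", 2), ("c", 7), ("d", 4)])

def Spec_find_matched_and_unmatched_values (dict1 : List (String × Int)) (dict2 : List (String × Int)) (out : (List (String × Int)) × (List (String × Int))) : Prop := out = find_matched_and_unmatched_values_alt dict1 dict2
instance (dict1 : List (String × Int)) (dict2 : List (String × Int)) (out : (List (String × Int)) × (List (String × Int))) : Decidable (Spec_find_matched_and_unmatched_values dict1 dict2 out) := by unfold Spec_find_matched_and_unmatched_values; infer_instance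

-- ===== CLAIM (what is proved, stated in full; the proofs are below) =====
def Claim_equal_find_matched_and_unmatched_values : Prop := ∀ (dict1 : List (String × Int)) (dict2 : List (String × Int)), Dom_find_matched_and_unmatched_values dict1 dict2 → Pre_find_matched_and_unmatched_values dict1 dict2 → Spec_find_matched_and_unmatched_values dict1 dict2 (find_matched_and_unmatched_values dict1 dict2)

-- ===== LEMMAS AND PROOFS =====

-- Phase 1 of A: the classifying fold over l appends to the two dicts' item lists,
-- provided l's keys are distinct and fresh for both accumulators.
theorem pv_fold1 (p : String × Int → Bool) (l : List (String × Int))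
    (m u : PySem.Dict String Int)
    (hl : (l.map Prod.fst).Nodup)
    (hm : ∀ kv ∈ l, m.contains kv.1 = false)
    (hu : ∀ kv ∈ l, u.contains kv.1 = false) :
    (l.foldl (fun acc kv =>
        if p kv then (acc.1.insert kv.1 kv.2, acc.2)
        else (acc.1, acc.2.insert kv.1 kv.2)) (m, u))
      = (PySem.Dict.mk (m.items ++ l.filter p),
         PySem.Dict.mk (u.items ++ l.filter (fun kv => !(p kv)))) := by
  induction l generalizing m u with
  | nil => simp
  | cons kv t ih =>
    simp only [List.map_cons, List.nodup_cons, List.mem_map] at hl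
    have hmk : m.contains kv.1 = false := hm kv (by simp)
    have huk : u.contains kv.1 = false := hu kv (by simp)
    have hfresh : ∀ (d : PySem.Dict String Int) (v : Int),
        (∀ kv' ∈ kv :: t, d.contains kv'.1 = false) →
        ∀ kv' ∈ t, (d.insert kv.1 v).contains kv'.1 = false := by
      intro d v hd kv' h'
      rw [PySem.Dict.contains_insert]
      have hne : kv'.1 ≠ kv.1 := by
        intro e; exact hl.1 ⟨kv', h', e⟩
      simp [hne, hd kv' (List.mem_cons_of_mem _ h')]
    by_cases hp : p kv
    · rw [List.foldl_cons, if_pos hp,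
         ih (m.insert kv.1 kv.2) u hl.2
           (hfresh m kv.2 hm) (fun kv' h' => hu kv' (List.mem_cons_of_mem _ h')),
         PySem.Dict.items_insert_of_not_contains m kv.2 hmk]
      simp [hp]
    · rw [List.foldl_cons, if_neg hp,
         ih m (u.insert kv.1 kv.2) hl.2
           (fun kv' h' => hm kv' (List.mem_cons_of_mem _ h')) (hfresh u kv.2 hu),
         PySem.Dict.items_insert_of_not_contains u kv.2 huk]
      simp [hp]

-- Phase 2 of A: the conditional-insert fold appends, provided inserted keys are fresh.
theorem pv_fold2 (q : String × Int → Bool) (l : List (String × Int))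
    (u : PySem.Dict String Int)
    (hl : (l.map Prod.fst).Nodup)
    (hu : ∀ kv ∈ l, q kv = true → u.contains kv.1 = false) :
    (l.foldl (fun u kv => if q kv then u.insert kv.1 kv.2 else u) u)
      = PySem.Dict.mk (u.items ++ l.filter q) := by
  induction l generalizing u with
  | nil => simp
  | cons kv t ih =>
    simp only [List.map_cons, List.nodup_cons, List.mem_map] at hl
    by_cases hq : q kv
    · have huk : u.contains kv.1 = false := hu kv (by simp) hq
      rw [List.foldl_cons, if_pos hq,
         ih (u.insert kv.1 kv.2) hl.2 ?_,
         PySem.Dict.items_insert_of_not_contains u kv.2 huk]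
      · simp [hq]
      · intro kv' h' hq'
        rw [PySem.Dict.contains_insert]
        have hne : kv'.1 ≠ kv.1 := fun e => hl.1 ⟨kv', h', e⟩
        simp [hne, hu kv' (List.mem_cons_of_mem _ h') hq']
    · rw [List.foldl_cons, if_neg hq,
         ih u hl.2 (fun kv' h' hq' => hu kv' (List.mem_cons_of_mem _ h') hq')]
      simp [hq]

-- With distinct keys, 'key in d and d[key] == value' is exactly membership of the pair.
theorem pv_contains_keys (l : List (String × Int)) (k : String) :
    (PySem.Dict.mk l).contains k = decide (k ∈ l.map Prod.fst) := by
  rw [PySem.Dict.contains_mk, Bool.eq_iff_iff]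
  simp [List.any_eq_true, List.mem_map]

theorem pv_lookup_mem (l : List (String × Int)) (k : String) (v : Int)
    (hn : (l.map Prod.fst).Nodup) :
    ((PySem.Dict.mk l).contains k && ((PySem.Dict.mk l).getD k 0 == v)) = decide ((k, v) ∈ l) := by
  induction l with
  | nil => simp [PySem.Dict.contains_mk, PySem.Dict.getD, PySem.Dict.get?]
  | cons kv t ih =>
    simp only [List.map_cons, List.nodup_cons, List.mem_map] at hn
    have hg : (PySem.Dict.mk (kv :: t)).getD k 0
        = if kv.1 == k then kv.2 else (PySem.Dict.mk t).getD k 0 := by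
      rcases kv with ⟨k', v'⟩
      show (((PySem.Dict.mk ((k', v') :: t)).get? k).getD 0) = _
      rw [PySem.Dict.get?_mk_cons]
      split <;> rfl
    by_cases hk : kv.1 = k
    · have hkt : (k, v) ∉ t := by
        intro hmem
        exact hn.1 ⟨(k, v), hmem, by rw [hk]⟩
      have hcontains : (PySem.Dict.mk (kv :: t)).contains k = true := by
        simp [PySem.Dict.contains_mk, hk]
      rw [hcontains, hg, if_pos (by simp [hk]), Bool.true_and, Bool.eq_iff_iff]
      simp only [beq_iff_eq, decide_eq_true_eq, List.mem_cons]
      constructor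
      · intro hv; exact Or.inl (by rw [← hv, ← hk])
      · rintro (he | hm)
        · exact (congrArg Prod.snd he).symm
        · exact absurd hm hkt
    · have hc : (PySem.Dict.mk (kv :: t)).contains k = (PySem.Dict.mk t).contains k := by
        simp [PySem.Dict.contains_mk, hk]
      have hne : (k, v) ≠ kv := fun e => hk (by rw [← e])
      rw [hg, if_neg (by simpa using hk), hc, ih hn.2, Bool.eq_iff_iff]
      simp only [decide_eq_true_eq, List.mem_cons]
      constructor
      · intro hm; exact Or.inr hm
      · rintro (he | hm)
        · exact absurd he hne
        · exact hm

-- The trailing while loop of B: folding 'only2.add(key)' over the rest of b.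
theorem pv_mem_foldl_add (b : List (String × Int)) (o2 : PySem.Set String) (k : String) :
    k ∈ b.foldl (fun s kv => PySem.Set.add s kv.1) o2 ↔ k ∈ o2 ∨ k ∈ b.map Prod.fst := by
  induction b generalizing o2 with
  | nil => simp
  | cons kv t ih => simp [ih, PySem.Set.mem_add]; tauto

-- Merge characterization 1: the matched-key set collects exactly the keys carrying
-- the same value in both (strictly key-sorted) lists.
theorem pv_merge_matched : ∀ (a b : List (String × Int)) (mk o2 : PySem.Set String),
    (a.map Prod.fst).Pairwise (· < ·) → (b.map Prod.fst).Pairwise (· < ·) → ∀ (k : String),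
    (k ∈ (pvMergeB a b mk o2).1 ↔ k ∈ mk ∨ ∃ v, (k, v) ∈ a ∧ (k, v) ∈ b) := by
  intro a b mk o2
  induction a, b, mk, o2 using pvMergeB.induct with
  | case1 b mk o2 => intro _ _ k; simp [pvMergeB]
  | case2 x ta mk o2 => intro _ _ k; simp [pvMergeB]
  | case3 k1 v1 ta k2 v2 tb mk o2 hlt ih =>
    intro ha hb k
    rw [pvMergeB, if_pos hlt, ih (List.pairwise_cons.1 ha).2 hb k]
    have h2 : ∀ k' ∈ tb.map Prod.fst, k2 < k' := (List.pairwise_cons.1 hb).1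
    constructor
    · rintro (h | ⟨v, h1, h2'⟩)
      · exact Or.inl h
      · exact Or.inr ⟨v, List.mem_cons_of_mem _ h1, h2'⟩
    · rintro (h | ⟨v, h1, h2'⟩)
      · exact Or.inl h
      rcases List.mem_cons.1 h1 with he | h1t
      · -- head of a: k = k1 would have to occur in b, but all keys of b exceed k1
        injection he with hk hv
        exfalso
        rcases List.mem_cons.1 h2' with he2 | h2t
        · injection he2 with hk2 hv2
          rw [← hk, ← hk2] at hlt
          exact lt_irrefl k hlt
        · have hgt := h2 k (List.mem_map.2 ⟨(k, v), h2t, rfl⟩)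
          rw [← hk] at hlt
          exact lt_irrefl k (lt_trans hlt hgt)
      · exact Or.inr ⟨v, h1t, h2'⟩
  | case4 k1 v1 ta k2 v2 tb mk o2 hge hlt ih =>
    intro ha hb k
    rw [pvMergeB, if_neg hge, if_pos hlt, ih ha (List.pairwise_cons.1 hb).2 k]
    have h1 : ∀ k' ∈ ta.map Prod.fst, k1 < k' := (List.pairwise_cons.1 ha).1
    constructor
    · rintro (h | ⟨v, h1', h2'⟩)
      · exact Or.inl h
      · exact Or.inr ⟨v, h1', List.mem_cons_of_mem _ h2'⟩
    · rintro (h | ⟨v, h1', h2'⟩)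
      · exact Or.inl h
      rcases List.mem_cons.1 h2' with he | h2t
      · injection he with hk hv
        exfalso
        rcases List.mem_cons.1 h1' with he1 | h1t
        · injection he1 with hk1 hv1
          rw [← hk, ← hk1] at hlt
          exact lt_irrefl k hlt
        · have hgt := h1 k (List.mem_map.2 ⟨(k, v), h1t, rfl⟩)
          rw [← hk] at hlt
          exact lt_irrefl k (lt_trans hlt hgt)
      · exact Or.inr ⟨v, h1', h2t⟩
  | case5 k1 v1 ta k2 v2 tb mk o2 hge hge' ih =>
    intro ha hb k
    have hkk : k1 = k2 := le_antisymm (not_lt.1 hge') (not_lt.1 hge)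
    rw [pvMergeB, if_neg hge, if_neg hge', ← dite_eq_ite,
       ih (List.pairwise_cons.1 ha).2 (List.pairwise_cons.1 hb).2 k]
    have h1 : ∀ k' ∈ ta.map Prod.fst, k1 < k' := (List.pairwise_cons.1 ha).1
    have h2 : ∀ k' ∈ tb.map Prod.fst, k2 < k' := (List.pairwise_cons.1 hb).1
    have hmk' : (k ∈ if _ : (v1 == v2) = true then PySem.Set.add mk k1 else mk) ↔
        k ∈ mk ∨ (k = k1 ∧ v1 = v2) := by
      by_cases hv : v1 = v2
      · simp [hv, PySem.Set.mem_add]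
      · simp [hv]
    rw [hmk']
    constructor
    · rintro ((h | ⟨hk, hv⟩) | ⟨v, h1', h2'⟩)
      · exact Or.inl h
      · exact Or.inr ⟨v1, by simp [hk], by rw [hv, hk, hkk]; simp⟩
      · exact Or.inr ⟨v, List.mem_cons_of_mem _ h1', List.mem_cons_of_mem _ h2'⟩
    · rintro (h | ⟨v, h1', h2'⟩)
      · exact Or.inl (Or.inl h)
      rcases List.mem_cons.1 h1' with he1 | h1t
      · injection he1 with hk hv
        rcases List.mem_cons.1 h2' with he2 | h2t
        · injection he2 with hk2 hv2
          exact Or.inl (Or.inr ⟨hk, by rw [← hv, ← hv2]⟩)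
        · exfalso
          have hgt := h2 k (List.mem_map.2 ⟨(k, v), h2t, rfl⟩)
          rw [hk, hkk] at hgt
          exact lt_irrefl k2 hgt
      · rcases List.mem_cons.1 h2' with he2 | h2t
        · injection he2 with hk2 hv2
          exfalso
          have hgt := h1 k (List.mem_map.2 ⟨(k, v), h1t, rfl⟩)
          rw [hk2, ← hkk] at hgt
          exact lt_irrefl k1 hgt
        · exact Or.inr ⟨v, h1t, h2t⟩

-- Merge characterization 2: the only2 set collects exactly the b-keys absent from a.
theorem pv_merge_only2 : ∀ (a b : List (String × Int)) (mk o2 : PySem.Set String),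
    (a.map Prod.fst).Pairwise (· < ·) → (b.map Prod.fst).Pairwise (· < ·) → ∀ (k : String),
    (k ∈ (pvMergeB a b mk o2).2 ↔ k ∈ o2 ∨ (k ∈ b.map Prod.fst ∧ k ∉ a.map Prod.fst)) := by
  intro a b mk o2
  induction a, b, mk, o2 using pvMergeB.induct with
  | case1 b mk o2 =>
    intro _ _ k
    rw [pvMergeB]
    simpa using pv_mem_foldl_add b o2 k
  | case2 x ta mk o2 => intro _ _ k; simp [pvMergeB]
  | case3 k1 v1 ta k2 v2 tb mk o2 hlt ih =>
    intro ha hb k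
    rw [pvMergeB, if_pos hlt, ih (List.pairwise_cons.1 ha).2 hb k]
    have h2 : ∀ k' ∈ tb.map Prod.fst, k2 < k' := (List.pairwise_cons.1 hb).1
    have hk1b : k1 ∉ ((k2, v2) :: tb).map Prod.fst := by
      simp only [List.map_cons, List.mem_cons]
      rintro (he | hm)
      · rw [he] at hlt; exact lt_irrefl _ hlt
      · exact lt_irrefl _ (lt_trans hlt (h2 k1 hm))
    constructor
    · rintro (h | ⟨hkb, hka⟩)
      · exact Or.inl h
      · refine Or.inr ⟨hkb, ?_⟩
        simp only [List.map_cons, List.mem_cons]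
        rintro (he | hm)
        · exact hk1b (he ▸ hkb)
        · exact hka hm
    · rintro (h | ⟨hkb, hka⟩)
      · exact Or.inl h
      · exact Or.inr ⟨hkb, fun hm => hka (by simpa using Or.inr hm)⟩
  | case4 k1 v1 ta k2 v2 tb mk o2 hge hlt ih =>
    intro ha hb k
    rw [pvMergeB, if_neg hge, if_pos hlt, ih ha (List.pairwise_cons.1 hb).2 k]
    have h1 : ∀ k' ∈ ta.map Prod.fst, k1 < k' := (List.pairwise_cons.1 ha).1
    have hk2a : k2 ∉ ((k1, v1) :: ta).map Prod.fst := by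
      simp only [List.map_cons, List.mem_cons]
      rintro (he | hm)
      · rw [he] at hlt; exact lt_irrefl _ hlt
      · exact lt_irrefl _ (lt_trans hlt (h1 k2 hm))
    rw [PySem.Set.mem_add]
    constructor
    · rintro ((h | he) | ⟨hkb, hka⟩)
      · exact Or.inl h
      · exact Or.inr ⟨by simp [he], he ▸ hk2a⟩
      · exact Or.inr ⟨by simpa using Or.inr hkb, hka⟩
    · rintro (h | ⟨hkb, hka⟩)
      · exact Or.inl (Or.inl h)
      rcases List.mem_cons.1 hkb with he | hm
      · exact Or.inl (Or.inr he)
      · exact Or.inr ⟨hm, hka⟩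
  | case5 k1 v1 ta k2 v2 tb mk o2 hge hge' ih =>
    intro ha hb k
    have hkk : k1 = k2 := le_antisymm (not_lt.1 hge') (not_lt.1 hge)
    rw [pvMergeB, if_neg hge, if_neg hge', ← dite_eq_ite,
       ih (List.pairwise_cons.1 ha).2 (List.pairwise_cons.1 hb).2 k]
    have h2 : ∀ k' ∈ tb.map Prod.fst, k2 < k' := (List.pairwise_cons.1 hb).1
    constructor
    · rintro (h | ⟨hkb, hka⟩)
      · exact Or.inl h
      · refine Or.inr ⟨by simpa using Or.inr hkb, ?_⟩
        simp only [List.map_cons, List.mem_cons]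
        rintro (he | hm)
        · have := h2 k hkb
          rw [he, hkk] at this
          exact lt_irrefl _ this
        · exact hka hm
    · rintro (h | ⟨hkb, hka⟩)
      · exact Or.inl h
      rcases List.mem_cons.1 hkb with he | hm
      · exact absurd (by simp [he, ← hkk]) hka
      · exact Or.inr ⟨hm, fun hx => hka (by simpa using Or.inr hx)⟩

-- The key-sorted copy of a nodup-keyed list has strictly increasing keys.
theorem pv_sorted_strict (l : List (String × Int)) (hn : (l.map Prod.fst).Nodup) :
    ((PySem.List.sorted l (fun kv => kv.1)).map Prod.fst).Pairwise (· < ·) := by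
  have hperm : (PySem.List.sorted l (fun kv => kv.1)).Perm l :=
    PySem.List.sorted_perm l (fun kv => kv.1) false
  have hnd : ((PySem.List.sorted l (fun kv => kv.1)).map Prod.fst).Nodup :=
    ((hperm.map Prod.fst).nodup_iff).2 hn
  have hle : ((PySem.List.sorted l (fun kv => kv.1)).map Prod.fst).Pairwise (· ≤ ·) := by
    rw [List.pairwise_map]
    exact PySem.List.sorted_pairwise l (fun kv => kv.1)
  exact (hle.and hnd).imp (fun h => lt_of_le_of_ne h.1 h.2)

-- ===== VERDICT (by name: the statement is the Claim_ definition above) =====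
theorem find_matched_and_unmatched_values_spec : Claim_equal_find_matched_and_unmatched_values := by
  intro dict1 dict2 _ hpre
  obtain ⟨h1, h2⟩ := hpre
  unfold Spec_find_matched_and_unmatched_values
  unfold find_matched_and_unmatched_values find_matched_and_unmatched_values_alt
  simp only []
  set d2 : PySem.Dict String Int := PySem.Dict.mk dict2 with hd2
  set d1 : PySem.Dict String Int := PySem.Dict.mk dict1 with hd1
  set p : String × Int → Bool := fun kv => d2.contains kv.1 && (d2.getD kv.1 0 == kv.2) with hp
  set q : String × Int → Bool := fun kv => !(d1.contains kv.1) with hq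
  -- A's loops become filters
  rw [pv_fold1 p dict1 PySem.Dict.empty PySem.Dict.empty h1
      (fun kv _ => PySem.Dict.contains_empty kv.1) (fun kv _ => PySem.Dict.contains_empty kv.1)]
  rw [pv_fold2 q dict2 _ h2 ?_]
  · -- B's filters agree with A's, via the merge characterizations
    set a : List (String × Int) := PySem.List.sorted dict1 (fun kv => kv.1) with hasort
    set b : List (String × Int) := PySem.List.sorted dict2 (fun kv => kv.1) with hbsort
    have hsa := pv_sorted_strict dict1 h1
    have hsb := pv_sorted_strict dict2 h2
    have hpt1 : ∀ kv ∈ dict1,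
        PySem.Set.contains (pvMergeB a b PySem.Set.empty PySem.Set.empty).1 kv.1 = p kv := by
      intro kv hkv
      have hinj : ∀ x ∈ dict1, ∀ y ∈ dict1, x.1 = y.1 → x = y := List.inj_on_of_nodup_map h1
      have hiff : kv.1 ∈ (pvMergeB a b PySem.Set.empty PySem.Set.empty).1 ↔ kv ∈ dict2 := by
        rw [pv_merge_matched a b PySem.Set.empty PySem.Set.empty hsa hsb kv.1]
        simp only [PySem.Set.empty, List.not_mem_nil, false_or]
        constructor
        · rintro ⟨v, hva, hvb⟩
          have hva1 : (kv.1, v) ∈ dict1 := (PySem.List.mem_sorted dict1 _ false _).1 hva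
          have := hinj (kv.1, v) hva1 kv hkv rfl
          rw [← this] at hvb ⊢
          exact (PySem.List.mem_sorted dict2 _ false _).1 hvb
        · intro hm
          exact ⟨kv.2, (PySem.List.mem_sorted dict1 _ false _).2 hkv,
                 (PySem.List.mem_sorted dict2 _ false _).2 hm⟩
      have hpv : p kv = decide (kv ∈ dict2) := by
        rw [hp, hd2]
        simpa using pv_lookup_mem dict2 kv.1 kv.2 h2
      rw [hpv]
      simp only [PySem.Set.contains, List.contains_eq_mem]
      exact decide_eq_decide.2 hiff
    have hpt2 : ∀ kv ∈ dict2,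
        PySem.Set.contains (pvMergeB a b PySem.Set.empty PySem.Set.empty).2 kv.1 = q kv := by
      intro kv hkv
      have hiff : kv.1 ∈ (pvMergeB a b PySem.Set.empty PySem.Set.empty).2 ↔ kv.1 ∉ dict1.map Prod.fst := by
        rw [pv_merge_only2 a b PySem.Set.empty PySem.Set.empty hsa hsb kv.1]
        simp only [PySem.Set.empty, List.not_mem_nil, false_or]
        constructor
        · rintro ⟨-, hka⟩
          intro hm
          rcases List.mem_map.1 hm with ⟨kv', hkv', he⟩
          exact hka (List.mem_map.2 ⟨kv', (PySem.List.mem_sorted dict1 _ false _).2 hkv', he⟩)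
        · intro hka
          refine ⟨List.mem_map.2 ⟨kv, (PySem.List.mem_sorted dict2 _ false _).2 hkv, rfl⟩, ?_⟩
          intro hm
          rcases List.mem_map.1 hm with ⟨kv', hkv', he⟩
          exact hka (List.mem_map.2 ⟨kv', (PySem.List.mem_sorted dict1 _ false _).1 hkv', he⟩)
      have hqv : q kv = decide (kv.1 ∉ dict1.map Prod.fst) := by
        rw [hq, hd1]
        show (!(PySem.Dict.mk dict1).contains kv.1) = _
        rw [pv_contains_keys, decide_not]
      rw [hqv]
      simp only [PySem.Set.contains, List.contains_eq_mem]
      exact decide_eq_decide.2 hiff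
    refine Prod.ext_iff.2 ⟨?_, ?_⟩
    · exact (List.filter_congr hpt1).symm
    · exact congrArg₂ (· ++ ·)
        (List.filter_congr (fun kv h => by
          show (!(PySem.Set.contains (pvMergeB a b PySem.Set.empty PySem.Set.empty).1 kv.1)) = !(p kv)
          rw [hpt1 kv h])).symm
        (List.filter_congr hpt2).symm
  · -- freshness of dict2-only keys for the phase-1 unmatched dict
    intro kv hkv hqkv
    rw [Bool.eq_false_iff]
    intro hc
    simp only [PySem.Dict.contains_mk, PySem.Dict.empty, List.nil_append, List.any_eq_true,
      beq_iff_eq] at hc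
    obtain ⟨kv', hkv', he⟩ := hc
    have hkv1 : kv' ∈ dict1 := (List.mem_filter.1 hkv').1
    rw [hq] at hqkv
    simp only [Bool.not_eq_true'] at hqkv
    rw [hd1] at hqkv
    simp only [PySem.Dict.contains_mk] at hqkv
    have htrue : dict1.any (fun p => p.1 == kv.1) = true :=
      List.any_eq_true.2 ⟨kv', hkv1, by simp [he]⟩
    simp [htrue] at hqkv
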